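-- pv_equiv track=rewrite | github.com/kah-ve/codesignal | CodingTasks/Graphs/feedingTime/feedingTime.py | feedingTime
-- ===== SOURCE A (Python) =====
-- def feedingTime(classes):
--
--     N = len(classes)
--     colorArr = [0] * N
--
--     #creating the graph out of the classes
--     graph = [[0 for _ in range(N)] for _ in range(N)] # 2D array for graph
--     classes = [set(c) for c in classes]
--
--     # iterate through set and check where there are intersections
--     for i in range(N-1):
--         for j in range(i+1, N):
--             if classes[i].intersection(classes[j]):
--                 graph[i][j] = 1
--                 graph[j][i] = 1
--
--     def isColorable(curr, colorArr, color):
--         for nei in range(N):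
--             if graph[curr][nei] == 1 and colorArr[nei] == color:
--                 return False # a neighbor shares the color, not colorable with this color
--         return True
--
--     def coloringGraph(curr, k):
--         if curr == N:
--             return True # it has recursed till past the last node and has passed the colorability check
--
--         for color in range(1, k+1): # see if k coloring works by trial and error of different colors
--             if isColorable(curr, colorArr, color):
--                 colorArr[curr] = color # colored the current node
--
--                 # now check neighbors recursively
--                 if coloringGraph(curr+1, k):
--                     return True # get here if we iterate through all neighbors and curr = N at the top, then it passed coloring test
--
--                 # if above test fails, then we know that the neighbors are not k colorable, reset to try again in future
--                 colorArr[curr] = 0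
--
--         return False # we haven't returned True until this point so the coloring range does not work with k, return False
--
--
--     for k in range (1, 6):
--         if coloringGraph(0, k):
--             return k # found a k coloring that works
--
--     return -1 # no coloring found within 5 colorable, so return -1
-- ===== SOURCE B (Python) =====
-- def feedingTime(classes):
--     # same adjacency-graph construction as before
--     N = len(classes)
--     graph = [[0 for _ in range(N)] for _ in range(N)]
--     classes = [set(c) for c in classes]
--     for i in range(N - 1):
--         for j in range(i + 1, N):
--             if classes[i].intersection(classes[j]):
--                 graph[i][j] = 1
--                 graph[j][i] = 1
--
--     best = 6  # anything > 5 means "no coloring within 5 colors exists"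
--     colors = [0] * N
--
--     # single branch-and-bound search over canonical colorings: node i may only
--     # use a color in 1..min(used+1, 5), where `used` is the largest color used
--     # so far; a complete coloring updates the running minimum `best`.
--     def search(i, used):
--         nonlocal best
--         if used >= best:
--             return  # cannot improve on the best complete coloring found
--         if i == N:
--             best = used
--             return
--         for c in range(1, min(used + 1, 5) + 1):
--             if all(graph[i][j] == 0 or colors[j] != c for j in range(i)):
--                 colors[i] = c
--                 search(i + 1, max(used, c))
--                 colors[i] = 0
--
--     search(0, 1)
--     return best if best <= 5 else -1
-- ===== Notes on version B (the rewrite author's own statement) =====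
-- stated objective: alternative
-- what changed: Keeps the adjacency-graph construction but replaces the five independent full backtracking searches (k = 1..5, restart from scratch each time) by a single branch-and-bound recursion over canonical colorings (node i may only use colors 1..min(max_used+1,5)) that maintains a running minimum of colors used and prunes branches that cannot beat it.
import Mathlib
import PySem

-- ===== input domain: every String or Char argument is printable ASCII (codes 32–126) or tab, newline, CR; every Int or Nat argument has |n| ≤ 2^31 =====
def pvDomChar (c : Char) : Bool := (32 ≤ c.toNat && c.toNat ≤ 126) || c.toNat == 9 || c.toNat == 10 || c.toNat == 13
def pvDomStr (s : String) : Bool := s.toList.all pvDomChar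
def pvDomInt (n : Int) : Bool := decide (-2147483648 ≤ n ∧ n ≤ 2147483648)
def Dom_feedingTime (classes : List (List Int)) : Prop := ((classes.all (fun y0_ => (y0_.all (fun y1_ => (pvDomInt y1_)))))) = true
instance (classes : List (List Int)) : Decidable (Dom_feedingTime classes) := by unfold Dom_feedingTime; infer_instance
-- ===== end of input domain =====

-- B keeps A's adjacency-graph construction but replaces the five restarted backtracking
-- searches by ONE branch-and-bound recursion over canonical colorings (objective: alternative).

-- ===== PORT A =====
-- shared by both ports: both Pythons build the graph with the identical code
def pvSet2 (g : List (List Int)) (i j : Nat) (v : Int) : List (List Int) :=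
  g.modify i (fun row => row.set j v)

def zeroMatrix (N : Nat) : List (List Int) :=
  (List.range N).map (fun _ => (List.range N).map (fun _ => (0 : Int)))

-- the inner `for j in range(i+1, N)` loop
def addEdges (sets : List (List Int)) (N : Nat) (g : List (List Int)) (i : Nat) : List (List Int) :=
  (List.range' (i + 1) (N - 1 - i)).foldl (fun g j =>
    if !(PySem.Set.inter (sets.getD i []) (sets.getD j [])).isEmpty then
      pvSet2 (pvSet2 g i j 1) j i 1
    else g) g

def buildGraph (classes : List (List Int)) : List (List Int) :=
  (List.range (classes.length - 1)).foldl
    (addEdges (classes.map PySem.Set.ofList) classes.length) (zeroMatrix classes.length)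

def isColorable (graph : List (List Int)) (N curr : Nat) (colorArr : List Int) (color : Int) : Bool :=
  (List.range N).all fun nei =>
    !(((graph.getD curr []).getD nei 0 == 1) && (colorArr.getD nei 0 == color))

-- the `for color in range(1, k+1)` loop of coloringGraph, threading the mutable colorArr
def colorLoopA (graph : List (List Int)) (N curr : Nat)
    (rec : List Int → Bool × List Int) : List Int → List Int → Bool × List Int
  | [], arr => (false, arr)
  | c :: cs, arr =>
    if isColorable graph N curr arr c then
      let r := rec (arr.set curr c)
      if r.1 then (true, r.2)
      else colorLoopA graph N curr rec cs (r.2.set curr 0)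
    else colorLoopA graph N curr rec cs arr

-- coloringGraph(curr, k); fuel = N - curr
def goA (graph : List (List Int)) (N k : Nat) : Nat → List Int → Bool × List Int
  | 0, arr => (true, arr)
  | fuel + 1, arr =>
    colorLoopA graph N (N - (fuel + 1)) (goA graph N k fuel)
      ((List.range k).map (fun c => (c : Int) + 1)) arr

-- the `for k in range(1, 6)` loop
def kLoopA (graph : List (List Int)) (N : Nat) : List Nat → Int
  | [] => -1
  | k :: ks => if (goA graph N k N (List.replicate N 0)).1 then (k : Int) else kLoopA graph N ks

def feedingTime (classes : List (List Int)) : Int :=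
  let N := classes.length
  let graph := buildGraph classes
  kLoopA graph N [1, 2, 3, 4, 5]

-- ===== PORT B =====
def okB (graph : List (List Int)) (colors : List Int) (i : Nat) (c : Int) : Bool :=
  (List.range i).all fun j =>
    ((graph.getD i []).getD j 0 == 0) || !(colors.getD j 0 == c)

-- the `for c in range(1, min(used+1,5)+1)` loop of search, threading colors and best
def colorLoopB (graph : List (List Int)) (i used : Nat)
    (rec : Nat → List Int → Int → Int × List Int) :
    List Nat → List Int → Int → Int × List Int
  | [], colors, best => (best, colors)
  | c :: cs, colors, best =>
    if okB graph colors i (c : Int) then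
      let r := rec (max used c) (colors.set i (c : Int)) best
      colorLoopB graph i used rec cs (r.2.set i 0) r.1
    else colorLoopB graph i used rec cs colors best

-- search(i, used) with running best; fuel = N - i; returns (best, colors)
def goB (graph : List (List Int)) (N : Nat) : Nat → Nat → List Int → Int → Int × List Int
  | fuel, used, colors, best =>
    if (used : Int) ≥ best then (best, colors)
    else
      match fuel with
      | 0 => ((used : Int), colors)
      | fuel + 1 =>
        colorLoopB graph (N - (fuel + 1)) used (goB graph N fuel)
          ((List.range (min (used + 1) 5)).map (fun c => c + 1)) colors best

def feedingTime_alt (classes : List (List Int)) : Int :=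
  let N := classes.length
  let graph := buildGraph classes
  let best := (goB graph N N 1 (List.replicate N 0) 6).1
  if best ≤ 5 then best else -1

-- ===== PRECONDITION & SPEC =====
def Spec_feedingTime (classes : List (List Int)) (out : Int) : Prop := out = feedingTime_alt classes
instance (classes : List (List Int)) (out : Int) : Decidable (Spec_feedingTime classes out) := by unfold Spec_feedingTime; infer_instance

-- ===== CLAIM (what is proved, stated in full; the proofs are below) =====
def Claim_equal_feedingTime : Prop := ∀ (classes : List (List Int)), Dom_feedingTime classes → Spec_feedingTime classes (feedingTime classes)

-- ===== LEMMAS AND PROOFS =====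

-- proof layer: everything is about an arbitrary graph g (both ports use `buildGraph`)
def Edge (g : List (List Int)) (i j : Nat) : Prop := (g.getD i []).getD j 0 = 1

-- node i conflicts with no earlier node of the full coloring
def OkAt (g : List (List Int)) (full : List Int) (i : Nat) : Prop :=
  ∀ j < i, Edge g i j → full.getD i 0 ≠ full.getD j 0

def ValidFrom (g : List (List Int)) (full : List Int) (lo N : Nat) : Prop :=
  ∀ i, lo ≤ i → i < N → OkAt g full i

def Colorable (g : List (List Int)) (N k : Nat) : Prop :=
  ∃ cs : List Int, cs.length = N ∧ (∀ x ∈ cs, 1 ≤ x ∧ x ≤ (k : Int)) ∧ ValidFrom g cs 0 N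

-- canonical extensions of a colored prefix (what B's search enumerates)
def CExt (g : List (List Int)) : List Int → Nat → List Nat → Prop
  | _, _, [] => True
  | pref, used, c :: cs =>
    1 ≤ c ∧ c ≤ min (used + 1) 5 ∧
    (∀ j < pref.length, Edge g pref.length j → pref.getD j 0 ≠ (c : Int)) ∧
    CExt g (pref ++ [(c : Int)]) (max used c) cs

-- positions: arr is always (colored prefix) ++ (zeros); setting / reading around the boundary
theorem set_mid (pref : List Int) (f : Nat) (c : Int) :
    (pref ++ List.replicate (f + 1) (0 : Int)).set pref.length c = (pref ++ [c]) ++ List.replicate f 0 := by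
  rw [List.set_append_right _ _ (le_refl _)]
  simp [List.replicate_succ]

theorem set_mid_zero (pref : List Int) (f : Nat) (c : Int) :
    ((pref ++ [c]) ++ List.replicate f (0 : Int)).set pref.length 0 = pref ++ List.replicate (f + 1) 0 := by
  rw [List.append_assoc, List.set_append_right _ _ (le_refl _)]
  simp [List.replicate_succ]

theorem getD_left (pref : List Int) (t : List Int) (j : Nat) (hj : j < pref.length) :
    (pref ++ t).getD j 0 = pref.getD j 0 :=
  List.getD_append pref t 0 j hj

theorem getD_rep_right (pref : List Int) (f j : Nat) (hj : pref.length ≤ j) :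
    (pref ++ List.replicate f (0 : Int)).getD j 0 = 0 := by
  rw [List.getD_append_right _ _ _ _ hj]
  simp [List.getD, List.getElem?_replicate]
  split <;> simp

theorem goA_restore (g : List (List Int)) (N k : Nat) :
    ∀ fuel (pref : List Int), pref.length + fuel = N →
      (goA g N k fuel (pref ++ List.replicate fuel 0)).1 = false →
      (goA g N k fuel (pref ++ List.replicate fuel 0)).2 = pref ++ List.replicate fuel 0 := by
  intro fuel
  induction fuel with
  | zero => intro pref h hf; simp [goA] at hf
  | succ fuel ih =>
    intro pref h hf
    have hcurr : N - (fuel + 1) = pref.length := by omega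
    rw [goA, hcurr] at hf ⊢
    generalize ((List.range k).map (fun c => (c : Int) + 1)) = cl at hf ⊢
    induction cl with
    | nil => simp [colorLoopA]
    | cons c cl ihcl =>
      rw [colorLoopA] at hf ⊢
      by_cases hok : isColorable g N pref.length (pref ++ List.replicate (fuel + 1) 0) c = true
      · simp only [hok, if_true, set_mid, List.append_assoc, List.singleton_append] at hf ⊢
        rcases hb : (goA g N k fuel (pref ++ c :: List.replicate fuel 0)).1 with _ | _
        · have hrest := ih (pref ++ [c]) (by simp; omega) (by simpa using hb)
          simp only [List.append_assoc, List.singleton_append] at hrest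
          have hz : ((goA g N k fuel (pref ++ c :: List.replicate fuel 0)).2).set pref.length 0
              = pref ++ List.replicate (fuel + 1) 0 := by
            rw [hrest]
            simpa using set_mid_zero pref fuel c
          simp only [hb, if_false, Bool.false_eq_true, hz] at hf ⊢
          exact ihcl hf
        · simp [hb] at hf
      · simp only [hok, if_false, Bool.false_eq_true] at hf ⊢
        exact ihcl hf

theorem isColorable_iff (g : List (List Int)) (N : Nat) (pref : List Int) (f : Nat) (c : Int)
    (hc : 1 ≤ c) (h : pref.length + (f + 1) = N) :
    (isColorable g N pref.length (pref ++ List.replicate (f + 1) 0) c = true) ↔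
      (∀ j < pref.length, Edge g pref.length j → pref.getD j 0 ≠ c) := by
  unfold isColorable Edge
  simp only [List.all_eq_true, List.mem_range, Bool.not_eq_eq_eq_not, Bool.not_true,
    Bool.and_eq_false_iff, beq_eq_false_iff_ne, ne_eq]
  constructor
  · intro hall j hj hedge hval
    rcases hall j (by omega) with h1 | h2
    · exact h1 hedge
    · exact h2 (by rw [getD_left _ _ _ hj]; exact hval)
  · intro hall nei hnei
    by_cases hj : nei < pref.length
    · by_cases he : (g.getD pref.length []).getD nei 0 = 1
      · right; rw [getD_left _ _ _ hj]; exact hall nei hj he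
      · left; exact he
    · right
      rw [getD_rep_right _ _ _ (by omega)]
      omega

theorem validFrom_cons (g : List (List Int)) (pref cs' : List Int) (c : Int) (N : Nat)
    (hlt : pref.length < N) :
    ValidFrom g (pref ++ c :: cs') pref.length N ↔
      ((∀ j < pref.length, Edge g pref.length j → pref.getD j 0 ≠ c) ∧
        ValidFrom g ((pref ++ [c]) ++ cs') (pref.length + 1) N) := by
  have hget : (pref ++ c :: cs').getD pref.length 0 = c := by
    rw [List.getD_append_right _ _ _ _ (le_refl _)]
    simp
  constructor
  · intro hv
    refine ⟨fun j hj he hval => ?_, fun i h1 h2 => ?_⟩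
    · exact hv pref.length (le_refl _) hlt j hj he (by rw [hget, getD_left _ _ _ hj]; exact hval.symm)
    · simpa using hv i (by omega) h2
  · rintro ⟨hok, hv⟩ i h1 h2
    rcases Nat.eq_or_lt_of_le h1 with rfl | h1'
    · intro j hj he
      rw [hget, getD_left _ _ _ hj]
      exact fun hv' => hok j hj he hv'.symm
    · simpa using hv i (by omega) h2

theorem mem_colors (k : Nat) (c : Int) :
    c ∈ (List.range k).map (fun c => (c : Int) + 1) ↔ 1 ≤ c ∧ c ≤ (k : Int) := by
  constructor
  · intro hmem
    simp at hmem
    obtain ⟨m, hm, he⟩ := hmem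
    omega
  · intro h
    simp
    exact ⟨(c - 1).toNat, by omega, by omega⟩

theorem goA_iff (g : List (List Int)) (N k : Nat) :
    ∀ fuel (pref : List Int), pref.length + fuel = N →
      ((goA g N k fuel (pref ++ List.replicate fuel 0)).1 = true ↔
        ∃ cs : List Int, cs.length = fuel ∧ (∀ x ∈ cs, 1 ≤ x ∧ x ≤ (k : Int)) ∧
          ValidFrom g (pref ++ cs) pref.length N) := by
  intro fuel
  induction fuel with
  | zero =>
    intro pref h
    simp only [goA]
    constructor
    · intro _
      exact ⟨[], rfl, by simp, fun i h1 h2 => by omega⟩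
    · intro _; trivial
  | succ fuel ih =>
    intro pref h
    have hcurr : N - (fuel + 1) = pref.length := by omega
    rw [goA, hcurr]
    have hloop : ∀ cl : List Int,
        ((colorLoopA g N pref.length (goA g N k fuel) cl (pref ++ List.replicate (fuel + 1) 0)).1 = true ↔
          ∃ c ∈ cl, isColorable g N pref.length (pref ++ List.replicate (fuel + 1) 0) c = true ∧
            (goA g N k fuel ((pref ++ [c]) ++ List.replicate fuel 0)).1 = true) := by
      intro cl
      induction cl with
      | nil => simp [colorLoopA]
      | cons c cl ihcl =>
        rw [colorLoopA]
        by_cases hok : isColorable g N pref.length (pref ++ List.replicate (fuel + 1) 0) c = true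
        · simp only [hok, if_true, set_mid]
          rcases hb : (goA g N k fuel ((pref ++ [c]) ++ List.replicate fuel 0)).1 with _ | _
          · have hrest := goA_restore g N k fuel (pref ++ [c]) (by simp; omega) hb
            simp only [if_false, Bool.false_eq_true, hrest, set_mid_zero]
            rw [ihcl]
            constructor
            · rintro ⟨c', hmem, hok', hb'⟩
              exact ⟨c', List.mem_cons_of_mem _ hmem, hok', hb'⟩
            · rintro ⟨c', hmem, hok', hb'⟩
              rcases List.mem_cons.mp hmem with rfl | hmem'
              · rw [hb'] at hb; cases hb
              · exact ⟨c', hmem', hok', hb'⟩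
          · simp only [if_true]
            constructor
            · intro _
              exact ⟨c, List.mem_cons_self, hok, hb⟩
            · intro _; trivial
        · simp only [hok, if_false, Bool.false_eq_true]
          rw [ihcl]
          constructor
          · rintro ⟨c', hmem, hok', hb'⟩
            exact ⟨c', List.mem_cons_of_mem _ hmem, hok', hb'⟩
          · rintro ⟨c', hmem, hok', hb'⟩
            rcases List.mem_cons.mp hmem with rfl | hmem'
            · exact absurd hok' hok
            · exact ⟨c', hmem', hok', hb'⟩
    rw [hloop]
    constructor
    · rintro ⟨c, hmem, hok, hb⟩
      rcases (mem_colors k c).mp hmem with ⟨hc1, hc2⟩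
      rcases (ih (pref ++ [c]) (by simp; omega)).mp hb with ⟨cs', hlen', hbd', hv'⟩
      refine ⟨c :: cs', by simp [hlen'], ?_, ?_⟩
      · intro x hx
        rcases List.mem_cons.mp hx with rfl | hx'
        · exact ⟨hc1, hc2⟩
        · exact hbd' x hx'
      · rw [validFrom_cons g pref cs' c N (by omega)]
        refine ⟨(isColorable_iff g N pref fuel c hc1 h).mp hok, ?_⟩
        simpa using hv'
    · rintro ⟨cs, hlen, hbd, hv⟩
      rcases cs with _ | ⟨c, cs'⟩
      · simp at hlen
      · have hc := hbd c List.mem_cons_self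
        rw [validFrom_cons g pref cs' c N (by omega)] at hv
        refine ⟨c, (mem_colors k c).mpr hc, (isColorable_iff g N pref fuel c hc.1 h).mpr hv.1, ?_⟩
        refine (ih (pref ++ [c]) (by simp; omega)).mpr ⟨cs', by simp at hlen; omega, ?_, ?_⟩
        · exact fun x hx => hbd x (List.mem_cons_of_mem _ hx)
        · simpa using hv.2

-- all entries of the built graph are 0 or 1 (A tests `== 1`, B tests `== 0`)
def ZeroOne (g : List (List Int)) : Prop :=
  ∀ i j, (g.getD i []).getD j 0 = 0 ∨ (g.getD i []).getD j 0 = 1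

theorem nat_le_foldl_max (cs : List Nat) (used : Nat) : used ≤ cs.foldl max used := by
  induction cs generalizing used with
  | nil => simp
  | cons c cs ih => exact le_trans (Nat.le_max_left _ _) (ih _)

theorem foldl_max_le (cs : List Nat) (used K : Nat) (h1 : used ≤ K) (h2 : ∀ x ∈ cs, x ≤ K) :
    cs.foldl max used ≤ K := by
  induction cs generalizing used with
  | nil => simpa
  | cons c cs ih =>
    exact ih _ (max_le h1 (h2 c List.mem_cons_self)) (fun x hx => h2 x (List.mem_cons_of_mem _ hx))

theorem mem_le_foldl_max (cs : List Nat) (used x : Nat) (hx : x ∈ cs) : x ≤ cs.foldl max used := by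
  induction cs generalizing used with
  | nil => cases hx
  | cons c cs ih =>
    rcases List.mem_cons.mp hx with rfl | hx'
    · exact le_trans (Nat.le_max_right _ _) (nat_le_foldl_max _ _)
    · exact ih _ hx'

theorem mem_colorsB (m c : Nat) : c ∈ (List.range m).map (fun c => c + 1) ↔ 1 ≤ c ∧ c ≤ m := by
  simp only [List.mem_map, List.mem_range]
  constructor
  · rintro ⟨a, ha, rfl⟩; omega
  · rintro ⟨h1, h2⟩; exact ⟨c - 1, by omega, by omega⟩

theorem okB_iff (g : List (List Int)) (hg : ZeroOne g) (pref t : List Int) (c : Int) :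
    (okB g (pref ++ t) pref.length c = true) ↔
      ∀ j < pref.length, Edge g pref.length j → pref.getD j 0 ≠ c := by
  unfold okB Edge
  simp only [List.all_eq_true, List.mem_range, Bool.or_eq_true, beq_iff_eq,
    Bool.not_eq_eq_eq_not, Bool.not_true, beq_eq_false_iff_ne, ne_eq]
  constructor
  · intro hall j hj he hval
    rcases hall j hj with h0 | h1
    · rw [he] at h0; cases h0
    · exact h1 (by rw [getD_left _ _ _ hj]; exact hval)
  · intro hall j hj
    rcases hg pref.length j with h0 | h1
    · left; exact h0
    · right; rw [getD_left _ _ _ hj]; exact hall j hj h1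

theorem goB_spec (g : List (List Int)) (N : Nat) (hg : ZeroOne g) :
    ∀ fuel (pref : List Int) (used : Nat) (best : Int), pref.length + fuel = N → 1 ≤ used →
      (goB g N fuel used (pref ++ List.replicate fuel 0) best).2 = pref ++ List.replicate fuel 0 ∧
      (goB g N fuel used (pref ++ List.replicate fuel 0) best).1 ≤ best ∧
      ((goB g N fuel used (pref ++ List.replicate fuel 0) best).1 = best ∨
        ∃ cs : List Nat, cs.length = fuel ∧ CExt g pref used cs ∧
          (goB g N fuel used (pref ++ List.replicate fuel 0) best).1 = ((cs.foldl max used : Nat) : Int)) ∧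
      (∀ cs : List Nat, cs.length = fuel → CExt g pref used cs →
        (goB g N fuel used (pref ++ List.replicate fuel 0) best).1 ≤ ((cs.foldl max used : Nat) : Int)) := by
  intro fuel
  induction fuel with
  | zero =>
    intro pref used best h hused
    rw [goB]
    by_cases hp : (used : Int) ≥ best
    · simp only [hp, if_true]
      refine ⟨by trivial, le_refl _, Or.inl (by trivial), fun cs hlen hc => ?_⟩
      have := nat_le_foldl_max cs used
      omega
    · simp only [hp, if_false]
      refine ⟨by trivial, by omega, Or.inr ⟨[], rfl, trivial, by trivial⟩, fun cs hlen hc => ?_⟩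
      rw [List.length_eq_zero_iff] at hlen
      subst hlen
      simp
  | succ fuel ih =>
    intro pref used best h hused
    rw [goB]
    by_cases hp : (used : Int) ≥ best
    · simp only [hp, if_true]
      refine ⟨by trivial, le_refl _, Or.inl (by trivial), fun cs hlen hc => ?_⟩
      have := nat_le_foldl_max cs used
      omega
    · simp only [hp, if_false]
      have hcurr : N - (fuel + 1) = pref.length := by omega
      rw [hcurr]
      have hloop : ∀ (cl : List Nat) (b : Int),
          (colorLoopB g pref.length used (goB g N fuel) cl (pref ++ List.replicate (fuel + 1) 0) b).2
              = pref ++ List.replicate (fuel + 1) 0 ∧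
          (colorLoopB g pref.length used (goB g N fuel) cl (pref ++ List.replicate (fuel + 1) 0) b).1 ≤ b ∧
          ((colorLoopB g pref.length used (goB g N fuel) cl (pref ++ List.replicate (fuel + 1) 0) b).1 = b ∨
            ∃ c ∈ cl, okB g (pref ++ List.replicate (fuel + 1) 0) pref.length (c : Int) = true ∧
              ∃ cs' : List Nat, cs'.length = fuel ∧ CExt g (pref ++ [(c : Int)]) (max used c) cs' ∧
                (colorLoopB g pref.length used (goB g N fuel) cl (pref ++ List.replicate (fuel + 1) 0) b).1
                  = ((cs'.foldl max (max used c) : Nat) : Int)) ∧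
          (∀ c ∈ cl, okB g (pref ++ List.replicate (fuel + 1) 0) pref.length (c : Int) = true →
            ∀ cs' : List Nat, cs'.length = fuel → CExt g (pref ++ [(c : Int)]) (max used c) cs' →
              (colorLoopB g pref.length used (goB g N fuel) cl (pref ++ List.replicate (fuel + 1) 0) b).1
                ≤ ((cs'.foldl max (max used c) : Nat) : Int)) := by
        intro cl
        induction cl with
        | nil =>
          intro b
          refine ⟨by trivial, le_refl _, Or.inl (by trivial), fun c hc => ?_⟩
          cases hc
        | cons c cl ihcl =>
          intro b
          rw [colorLoopB]
          by_cases hok : okB g (pref ++ List.replicate (fuel + 1) 0) pref.length (c : Int) = true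
          · simp only [hok, if_true, set_mid]
            obtain ⟨hr2, hr1, hr3, hr4⟩ :=
              ih (pref ++ [(c : Int)]) (max used c) b (by simp; omega) (le_trans hused (Nat.le_max_left _ _))
            set r := goB g N fuel (max used c) ((pref ++ [(c : Int)]) ++ List.replicate fuel 0) b with hr
            have hz : r.2.set pref.length 0 = pref ++ List.replicate (fuel + 1) 0 := by
              rw [hr2]
              exact set_mid_zero pref fuel (c : Int)
            rw [hz]
            obtain ⟨hl2, hl1, hl3, hl4⟩ := ihcl r.1
            refine ⟨hl2, le_trans hl1 hr1, ?_, ?_⟩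
            · rcases hl3 with heq | ⟨c', hmem, hok', cs', hlen', hcext', hval'⟩
              · rw [heq]
                rcases hr3 with heq' | ⟨cs', hlen', hcext', hval'⟩
                · exact Or.inl heq'
                · exact Or.inr ⟨c, List.mem_cons_self, hok, cs', hlen', hcext', hval'⟩
              · exact Or.inr ⟨c', List.mem_cons_of_mem _ hmem, hok', cs', hlen', hcext', hval'⟩
            · intro c' hmem hok' cs' hlen' hcext'
              rcases List.mem_cons.mp hmem with rfl | hmem'
              · exact le_trans hl1 (hr4 cs' hlen' hcext')
              · exact hl4 c' hmem' hok' cs' hlen' hcext'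
          · simp only [hok, if_false, Bool.false_eq_true]
            obtain ⟨hl2, hl1, hl3, hl4⟩ := ihcl b
            refine ⟨hl2, hl1, ?_, ?_⟩
            · rcases hl3 with heq | ⟨c', hmem, hok', cs', rest⟩
              · exact Or.inl heq
              · exact Or.inr ⟨c', List.mem_cons_of_mem _ hmem, hok', cs', rest⟩
            · intro c' hmem hok' cs' hlen' hcext'
              rcases List.mem_cons.mp hmem with rfl | hmem'
              · exact absurd hok' hok
              · exact hl4 c' hmem' hok' cs' hlen' hcext'
      obtain ⟨hl2, hl1, hl3, hl4⟩ := hloop ((List.range (min (used + 1) 5)).map (fun c => c + 1)) best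
      refine ⟨hl2, by omega, ?_, ?_⟩
      · rcases hl3 with heq | ⟨c, hmem, hok, cs', hlen', hcext', hval'⟩
        · exact Or.inl heq
        · obtain ⟨hc1, hc2⟩ := (mem_colorsB _ c).mp hmem
          refine Or.inr ⟨c :: cs', by simp [hlen'], ?_, hval'⟩
          exact ⟨hc1, hc2, (okB_iff g hg pref _ (c : Int)).mp hok, hcext'⟩
      · intro cs hlen hcext
        rcases cs with _ | ⟨c, cs'⟩
        · simp at hlen
        · obtain ⟨hc1, hc2, hvalid, hcext'⟩ := hcext
          exact hl4 c ((mem_colorsB _ c).mpr ⟨hc1, hc2⟩)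
            ((okB_iff g hg pref _ (c : Int)).mpr hvalid) cs' (by simp at hlen; omega) hcext' 

theorem prefix_foldl_add (l s : List Int) : s <+: l.foldl PySem.Set.add s := by
  induction l generalizing s with
  | nil => exact List.prefix_rfl
  | cons x xs ih =>
    refine List.IsPrefix.trans ?_ (ih (PySem.Set.add s x))
    unfold PySem.Set.add
    split
    · exact List.prefix_rfl
    · exact ⟨[x], rfl⟩

theorem idxOf_prefix (S P : List Int) (x : Int) (h : P <+: S) (hx : x ∈ P) :
    S.idxOf x = P.idxOf x := by
  obtain ⟨t, rfl⟩ := h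
  exact List.idxOf_append_of_mem hx

theorem dedup_length_le (full : List Int) (k : Nat)
    (hbd : ∀ x ∈ full, 1 ≤ x ∧ x ≤ (k : Int)) : (PySem.List.dedup full).length ≤ k := by
  have hnd := PySem.List.nodup_dedup full
  rw [List.toFinset_card_of_nodup hnd |>.symm]
  have hsub : (PySem.List.dedup full).toFinset ⊆ Finset.Icc (1 : Int) k := by
    intro x hx
    rw [List.mem_toFinset, PySem.List.mem_dedup] at hx
    rw [Finset.mem_Icc]
    exact hbd x hx
  calc (PySem.List.dedup full).toFinset.card ≤ (Finset.Icc (1 : Int) k).card := Finset.card_le_card hsub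
    _ = k := by rw [Int.card_Icc]; omega

theorem cext_colorable (g : List (List Int)) :
    ∀ (cs : List Nat) (pref : List Int) (used : Nat),
      CExt g pref used cs →
      (∀ x ∈ cs.map (fun c => Int.ofNat c), 1 ≤ x ∧ x ≤ ((cs.foldl max used : Nat) : Int)) ∧
      ValidFrom g (pref ++ cs.map (fun c => Int.ofNat c)) pref.length (pref.length + cs.length) := by
  intro cs
  induction cs with
  | nil =>
    intro pref used _
    exact ⟨by simp, fun i h1 h2 => by simp at h2; omega⟩
  | cons c cs ih =>
    intro pref used hc
    obtain ⟨h1, h2, hvalid, hcext⟩ := hc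
    obtain ⟨ihb, ihv⟩ := ih (pref ++ [(c : Int)]) (max used c) hcext
    constructor
    · intro x hx
      simp only [List.map_cons, List.mem_cons] at hx
      rcases hx with rfl | hx'
      · refine ⟨Int.ofNat_le.mpr h1, ?_⟩
        have hcle : c ≤ (c :: cs).foldl max used := by
          rw [List.foldl_cons]
          exact le_trans (Nat.le_max_right _ _) (nat_le_foldl_max _ _)
        exact Int.ofNat_le.mpr hcle
      · rw [List.foldl_cons]
        exact ihb x hx'
    · rw [List.map_cons]
      have hlt : pref.length < pref.length + (c :: cs).length := by simp
      rw [show pref.length + (c :: cs).length = pref.length + (cs.length + 1) by simp] at hlt ⊢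
      rw [validFrom_cons g pref (cs.map (fun c => Int.ofNat c)) (Int.ofNat c) _ hlt]
      refine ⟨hvalid, fun i hi1 hi2 => ?_⟩
      refine ihv i (by simp; omega) (by simp; omega)

theorem colorable_cext (g : List (List Int)) (N k : Nat) (hk1 : 1 ≤ k) (hk5 : k ≤ 5)
    (h : Colorable g N k) :
    ∃ cs : List Nat, cs.length = N ∧ CExt g [] 1 cs ∧ cs.foldl max 1 ≤ k := by
  obtain ⟨full, hlen, hbd, hval⟩ := h
  set S := PySem.List.dedup full with hS
  have hSlen : S.length ≤ k := dedup_length_le full k hbd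
  have hidx_inj : ∀ a ∈ S, ∀ b ∈ S, S.idxOf a = S.idxOf b → a = b := by
    intro a ha b hb hab
    have h1 := List.getElem_idxOf (List.idxOf_lt_length_of_mem ha)
    have h2 := List.getElem_idxOf (List.idxOf_lt_length_of_mem hb)
    rw [← h1, ← h2]
    congr 1
  have main : ∀ (rest pre : List Int), pre ++ rest = full →
      CExt g (pre.map (fun x => ((S.idxOf x + 1 : Nat) : Int)))
        ((pre.map (fun x => S.idxOf x + 1)).foldl max 1)
        (rest.map (fun x => S.idxOf x + 1)) := by
    intro rest
    induction rest with
    | nil => intro pre _; simp [CExt]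
    | cons x rest' ihr =>
      intro pre hfull
      have hxfull : x ∈ full := by rw [← hfull]; exact List.mem_append_right _ List.mem_cons_self
      have hxS : x ∈ S := (PySem.List.mem_dedup full x).mpr hxfull
      have hxlt : S.idxOf x < S.length := List.idxOf_lt_length_of_mem hxS
      rw [List.map_cons]
      refine ⟨by omega, ?_, ?_, ?_⟩
      · -- cap: S.idxOf x + 1 ≤ min (used + 1) 5
        have hc5 : S.idxOf x + 1 ≤ 5 := by omega
        have hcap : S.idxOf x ≤ (pre.map (fun x => S.idxOf x + 1)).foldl max 1 := by
          by_cases hxp : x ∈ pre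
          · have : S.idxOf x + 1 ∈ pre.map (fun x => S.idxOf x + 1) :=
              List.mem_map.mpr ⟨x, hxp, rfl⟩
            have := mem_le_foldl_max _ 1 _ this
            omega
          · set P := PySem.List.dedup pre with hP
            have hxP : x ∉ P := fun hc => hxp ((PySem.List.mem_dedup pre x).mp hc)
            have hfoldP : List.foldl PySem.Set.add [] pre = P := by
              rw [hP, PySem.List.dedup_eq_ofList, PySem.Set.ofList_eq_foldl]
            have hSfold : S = List.foldl PySem.Set.add (P ++ [x]) rest' := by
              rw [hS, ← hfull, PySem.List.dedup_eq_ofList, PySem.Set.ofList_eq_foldl,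
                List.foldl_append, List.foldl_cons, hfoldP]
              congr 1
              simp [PySem.Set.add, hxP]
            have hpre2 : (P ++ [x]) <+: S := by rw [hSfold]; exact prefix_foldl_add _ _
            have hidxx : S.idxOf x = P.length := by
              rw [idxOf_prefix S (P ++ [x]) x hpre2 (List.mem_append_right _ List.mem_cons_self)]
              rw [List.idxOf_append_of_notMem hxP]
              simp
            rcases Nat.eq_zero_or_pos P.length with hP0 | hPpos
            · omega
            · have hPnd : P.Nodup := PySem.List.nodup_dedup pre
              have hylt : P.length - 1 < P.length := by omega
              set y := P[P.length - 1] with hy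
              have hyP : y ∈ P := List.getElem_mem hylt
              have hypre : y ∈ pre := (PySem.List.mem_dedup pre y).mp hyP
              have hyidxP : P.idxOf y = P.length - 1 := hPnd.idxOf_getElem _ hylt
              have hPpref : P <+: S :=
                List.IsPrefix.trans ⟨[x], rfl⟩ hpre2
              have hyidxS : S.idxOf y = P.length - 1 := by
                rw [idxOf_prefix S P y hPpref hyP, hyidxP]
              have : S.idxOf y + 1 ∈ pre.map (fun x => S.idxOf x + 1) :=
                List.mem_map.mpr ⟨y, hypre, rfl⟩
              have := mem_le_foldl_max _ 1 _ this
              omega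
        omega
      · -- no conflict with earlier nodes
        intro j hj hedge heq
        simp only [List.length_map] at hj
        have hjlt : j < pre.length := hj
        have hgetm : (pre.map (fun x => ((S.idxOf x + 1 : Nat) : Int))).getD j 0
            = ((S.idxOf pre[j] + 1 : Nat) : Int) := by
          rw [List.getD_eq_getElem _ _ (by simpa using hjlt)]
          simp
        rw [hgetm] at heq
        have hidxeq : S.idxOf pre[j] = S.idxOf x := by
          have h' : S.idxOf pre[j] + 1 = S.idxOf x + 1 := Nat.cast_inj.mp heq
          omega
        have hjfull : pre[j] ∈ full := by
          rw [← hfull]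
          exact List.mem_append_left _ (List.getElem_mem hjlt)
        have hjS : pre[j] ∈ S := (PySem.List.mem_dedup full _).mpr hjfull
        have hvals : pre[j] = x := hidx_inj _ hjS _ hxS hidxeq
        -- contradict validity of `full` at node pre.length
        have hilt : pre.length < N := by rw [← hlen, ← hfull]; simp
        have hok := hval pre.length (Nat.zero_le _) hilt j (by simpa using hjlt)
          (by simpa [List.length_map] using hedge)
        apply hok
        have hgi : full.getD pre.length 0 = x := by
          rw [← hfull, List.getD_append_right _ _ _ _ (le_refl _)]
          simp
        have hgj : full.getD j 0 = pre.getD j 0 := by rw [← hfull]; exact getD_left _ _ _ hjlt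
        rw [hgi, hgj, List.getD_eq_getElem _ _ hjlt, hvals]
      · -- recurse
        have hstep := ihr (pre ++ [x]) (by simpa using hfull)
        simpa [List.foldl_append] using hstep
  have hmain := main full [] (by simp)
  refine ⟨full.map (fun x => S.idxOf x + 1), by simp [hlen], by simpa using hmain, ?_⟩
  refine foldl_max_le _ 1 k hk1 ?_
  intro v hv
  obtain ⟨x, hx, rfl⟩ := List.mem_map.mp hv
  have hxS : x ∈ S := (PySem.List.mem_dedup full x).mpr hx
  have := List.idxOf_lt_length_of_mem hxS
  omega

theorem getD_prop {α : Type} (P : α → Prop) (l : List α) (d : α) (i : Nat)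
    (hl : ∀ x ∈ l, P x) (hd : P d) : P (l.getD i d) := by
  rcases Nat.lt_or_ge i l.length with h | h
  · rw [List.getD_eq_getElem _ _ h]
    exact hl _ (List.getElem_mem h)
  · rw [List.getD_eq_default _ _ h]
    exact hd

theorem zeroOne_pvSet2 (g : List (List Int)) (i j : Nat) (hg : ZeroOne g) :
    ZeroOne (pvSet2 g i j 1) := by
  intro a b
  unfold pvSet2
  have hrow : (g.modify i fun row => row.set j 1).getD a []
      = if i = a then (g.getD a []).set j 1 else g.getD a [] := by
    simp only [List.getD]
    rw [List.getElem?_modify]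
    cases h : g[a]? <;> split <;> simp
  rw [hrow]
  split
  · simp only [List.getD]
    rw [List.getElem?_set]
    have hgab := hg a b
    simp only [List.getD] at hgab
    split
    · split
      · right; simp
      · left; simp
    · exact hgab
  · exact hg a b

theorem zeroOne_foldl {β : Type} (step : List (List Int) → β → List (List Int))
    (hstep : ∀ g b, ZeroOne g → ZeroOne (step g b)) :
    ∀ (l : List β) (g : List (List Int)), ZeroOne g → ZeroOne (l.foldl step g) := by
  intro l
  induction l with
  | nil => exact fun g hg => hg
  | cons x xs ih => exact fun g hg => ih _ (hstep g x hg)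

theorem zeroOne_zeroMatrix (N : Nat) : ZeroOne (zeroMatrix N) := by
  intro i j
  left
  unfold zeroMatrix
  refine getD_prop (fun row => List.getD row j 0 = 0) _ _ _ ?_ (by simp)
  intro row hrow
  obtain ⟨_, _, rfl⟩ := List.mem_map.mp hrow
  refine getD_prop (fun v => v = 0) _ _ _ ?_ rfl
  intro v hv
  obtain ⟨_, _, rfl⟩ := List.mem_map.mp hv
  rfl

theorem zeroOne_addEdges (sets : List (List Int)) (N : Nat) (g : List (List Int)) (i : Nat)
    (hg : ZeroOne g) : ZeroOne (addEdges sets N g i) := by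
  unfold addEdges
  refine zeroOne_foldl _ ?_ _ g hg
  intro g' j hg'
  split
  · exact zeroOne_pvSet2 _ _ _ (zeroOne_pvSet2 _ _ _ hg')
  · exact hg'

theorem zeroOne_buildGraph (classes : List (List Int)) : ZeroOne (buildGraph classes) := by
  unfold buildGraph
  exact zeroOne_foldl _ (fun g b hg => zeroOne_addEdges _ _ g b hg) _ _ (zeroOne_zeroMatrix _)

theorem cext_le5 (g : List (List Int)) :
    ∀ (cs : List Nat) (pref : List Int) (used : Nat), CExt g pref used cs → ∀ x ∈ cs, x ≤ 5 := by
  intro cs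
  induction cs with
  | nil => intro _ _ _ x hx; cases hx
  | cons c cs ih =>
    rintro pref used ⟨h1, h2, _, hrec⟩ x hx
    rcases List.mem_cons.mp hx with rfl | hx'
    · exact le_trans h2 (min_le_right _ _)
    · exact ih _ _ hrec x hx'

-- ===== VERDICT (by name: the statement is the Claim_ definition above) =====
theorem feedingTime_spec : Claim_equal_feedingTime := by
  unfold Claim_equal_feedingTime Spec_feedingTime
  intro classes _
  have hzo : ZeroOne (buildGraph classes) := zeroOne_buildGraph classes
  show kLoopA (buildGraph classes) classes.length [1, 2, 3, 4, 5]
      = (if (goB (buildGraph classes) classes.length classes.length 1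
            (List.replicate classes.length 0) 6).1 ≤ 5
         then (goB (buildGraph classes) classes.length classes.length 1
            (List.replicate classes.length 0) 6).1 else -1)
  set g := buildGraph classes with hgdef
  set N := classes.length with hNdef
  set r := (goB g N N 1 (List.replicate N 0) 6).1 with hrdef
  have hA : ∀ k : Nat, ((goA g N k N (List.replicate N 0)).1 = true ↔ Colorable g N k) := by
    intro k
    have h := goA_iff g N k N ([] : List Int) (by simp)
    simpa [Colorable] using h
  have eFalse : ∀ k : Nat, ¬ Colorable g N k → (goA g N k N (List.replicate N 0)).1 = false := by
    intro k hk
    rcases hb : (goA g N k N (List.replicate N 0)).1 with _ | _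
    · rfl
    · exact absurd ((hA k).mp hb) hk
  obtain ⟨hB2, hB1, hB3, hB4⟩ := goB_spec g N hzo N ([] : List Int) 1 6 (by simp) (le_refl 1)
  simp only [List.nil_append] at hB1 hB3 hB4
  have hUpper : ∀ k : Nat, 1 ≤ k → k ≤ 5 → Colorable g N k → r ≤ (k : Int) := by
    intro k h1 h5 hc
    obtain ⟨cs, hlen, hcext, hfle⟩ := colorable_cext g N k h1 h5 hc
    calc r ≤ ((cs.foldl max 1 : Nat) : Int) := hB4 cs hlen hcext
      _ ≤ (k : Int) := by exact_mod_cast hfle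
  have hWitness : r ≠ 6 → ∃ m : Nat, 1 ≤ m ∧ m ≤ 5 ∧ r = (m : Int) ∧ Colorable g N m := by
    intro hne
    rcases hB3 with heq | ⟨cs, hlen, hcext, heq⟩
    · exact absurd heq hne
    · refine ⟨cs.foldl max 1, nat_le_foldl_max cs 1, ?_, heq, ?_⟩
      · exact foldl_max_le cs 1 5 (by omega) (cext_le5 g cs [] 1 hcext)
      · obtain ⟨hbnd, hvf⟩ := cext_colorable g cs [] 1 hcext
        refine ⟨cs.map (fun c => Int.ofNat c), by simpa using hlen, ?_, ?_⟩
        · exact fun x hx => hbnd x hx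
        · simpa [hlen] using hvf
  have hVal : ∀ k : Nat, 1 ≤ k → k ≤ 5 → Colorable g N k →
      (∀ j : Nat, 1 ≤ j → j < k → ¬ Colorable g N j) → r = (k : Int) := by
    intro k h1 h5 hck hmin
    have hle := hUpper k h1 h5 hck
    have hne : r ≠ 6 := by omega
    obtain ⟨m, hm1, hm5, hrm, hcm⟩ := hWitness hne
    have hmk : k ≤ m := by
      by_contra hlt
      exact hmin m hm1 (by omega) hcm
    omega
  by_cases hC1 : Colorable g N 1
  · have hr := hVal 1 (by norm_num) (by norm_num) hC1 (fun j hj1 hjlt => by omega)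
    have e1 : (goA g N 1 N (List.replicate N 0)).1 = true := (hA 1).mpr hC1
    simp [kLoopA, e1, hr]
  · by_cases hC2 : Colorable g N 2
    · have hr := hVal 2 (by norm_num) (by norm_num) hC2
        (fun j hj1 hjlt => by interval_cases j <;> assumption)
      have e2 : (goA g N 2 N (List.replicate N 0)).1 = true := (hA 2).mpr hC2
      simp [kLoopA, eFalse 1 hC1, e2, hr]
    · by_cases hC3 : Colorable g N 3
      · have hr := hVal 3 (by norm_num) (by norm_num) hC3
          (fun j hj1 hjlt => by interval_cases j <;> assumption)
        have e3 : (goA g N 3 N (List.replicate N 0)).1 = true := (hA 3).mpr hC3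
        simp [kLoopA, eFalse 1 hC1, eFalse 2 hC2, e3, hr]
      · by_cases hC4 : Colorable g N 4
        · have hr := hVal 4 (by norm_num) (by norm_num) hC4
            (fun j hj1 hjlt => by interval_cases j <;> assumption)
          have e4 : (goA g N 4 N (List.replicate N 0)).1 = true := (hA 4).mpr hC4
          simp [kLoopA, eFalse 1 hC1, eFalse 2 hC2, eFalse 3 hC3, e4, hr]
        · by_cases hC5 : Colorable g N 5
          · have hr := hVal 5 (by norm_num) (by norm_num) hC5
              (fun j hj1 hjlt => by interval_cases j <;> assumption)
            have e5 : (goA g N 5 N (List.replicate N 0)).1 = true := (hA 5).mpr hC5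
            simp [kLoopA, eFalse 1 hC1, eFalse 2 hC2, eFalse 3 hC3, eFalse 4 hC4, e5, hr]
          · have hr6 : r = 6 := by
              by_contra hne
              obtain ⟨m, hm1, hm5, hrm, hcm⟩ := hWitness hne
              interval_cases m <;> [exact hC1 hcm; exact hC2 hcm; exact hC3 hcm; exact hC4 hcm; exact hC5 hcm]
            simp [kLoopA, eFalse 1 hC1, eFalse 2 hC2, eFalse 3 hC3, eFalse 4 hC4,
              eFalse 5 hC5, hr6]
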